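-- pv_equiv track=rewrite | github.com/geekquad/AlgoBook | python/maths/gcd_of_digits_of_num.py | digitGCD
-- ===== SOURCE A (Python) =====
-- def gcd(a, b):
--     return a if (b == 0) else gcd(b, a % b)
--
-- def digitGCD(n):
--     ans = 0
--     while n > 0:
--
--         ans = gcd(n % 10, ans)
--
--         # If at any point GCD is 1, return
--         if gcd == 1:
--             return 1
--
--         n = n // 10
--
--     return ans
-- ===== SOURCE B (Python) =====
-- def digitGCD(n):
--     # GCD of the decimal digits of n; 0 for n <= 0 (A's loop never runs there).
--     if n <= 0:
--         return 0
--     g = 0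
--     for c in str(n):
--         d = int(c)
--         while d:
--             g, d = d, g % d
--     return g
-- ===== Notes on version B (the rewrite author's own statement) =====
-- stated objective: idiomatic
-- what changed: B extracts the digits from the decimal string representation str(n) with an explicit n<=0 guard and folds them with an in-line iterative Euclid, instead of A's arithmetic %10 // 10 extraction loop around a recursive gcd helper.
import Mathlib
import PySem

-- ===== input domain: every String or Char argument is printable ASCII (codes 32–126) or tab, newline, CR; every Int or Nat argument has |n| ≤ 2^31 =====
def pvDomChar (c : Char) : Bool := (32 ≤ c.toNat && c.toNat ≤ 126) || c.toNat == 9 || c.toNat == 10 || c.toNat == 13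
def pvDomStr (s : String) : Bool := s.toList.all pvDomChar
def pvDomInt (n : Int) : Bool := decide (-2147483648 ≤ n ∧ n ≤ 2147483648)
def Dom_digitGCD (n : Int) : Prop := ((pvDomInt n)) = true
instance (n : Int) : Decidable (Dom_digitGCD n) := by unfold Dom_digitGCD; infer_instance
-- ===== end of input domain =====

-- B extracts the digits from str(n) (with an n ≤ 0 guard) and folds them with an
-- in-line iterative Euclid, instead of A's %10 // 10 extraction loop around a
-- recursive gcd helper; same results, no speed claim.

-- ===== PORT A =====
-- helper `gcd`: return a if (b == 0) else gcd(b, a % b)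
def pyGcd (a b : Int) : Int :=
  if h : b = 0 then a else pyGcd b (PySem.Int.mod a b)
termination_by b.natAbs
decreasing_by
  rcases lt_or_gt_of_ne h with hb | hb
  · have := PySem.Int.mod_neg_bounds a hb; omega
  · have h1 := PySem.Int.mod_nonneg a hb; have h2 := PySem.Int.mod_lt a hb; omega

-- the while-loop of digitGCD; the Python `if gcd == 1: return 1` compares the
-- FUNCTION object gcd with 1, hence is always False and contributes nothing.
def digitGCDLoop (n ans : Int) : Int :=
  if h : 0 < n then
    digitGCDLoop (PySem.Int.floordiv n 10) (pyGcd (PySem.Int.mod n 10) ans)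
  else ans
termination_by n.toNat
decreasing_by
  have : PySem.Int.floordiv n 10 = n / 10 := PySem.Int.floordiv_eq_ediv_of_pos (by norm_num)
  rw [this]; omega

def digitGCD (n : Int) : Int := digitGCDLoop n 0

-- ===== PORT B =====
-- the inner `while d: g, d = d, g % d` of Source B, as recursion on the state (g, d)
def gcdStep (g d : Int) : Int :=
  if h : d = 0 then g else gcdStep d (PySem.Int.mod g d)
termination_by d.natAbs
decreasing_by
  rcases lt_or_gt_of_ne h with hd | hd
  · have := PySem.Int.mod_neg_bounds g hd; omega
  · have h1 := PySem.Int.mod_nonneg g hd; have h2 := PySem.Int.mod_lt g hd; omega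

-- int(c) for a single decimal-digit character c is its code minus 48 ('0');
-- exact here because str(n) for n > 0 consists of digit characters only.
def digitGCD_alt (n : Int) : Int :=
  if n ≤ 0 then 0
  else (PySem.Int.toStr n).toList.foldl (fun g c => gcdStep g ((c.toNat : Int) - 48)) 0

-- ===== PRECONDITION & SPEC =====
def Spec_digitGCD (n : Int) (out : Int) : Prop := out = digitGCD_alt n
instance (n : Int) (out : Int) : Decidable (Spec_digitGCD n out) := by unfold Spec_digitGCD; infer_instance

-- ===== CLAIM (what is proved, stated in full; the proofs are below) =====
def Claim_equal_digitGCD : Prop := ∀ (n : Int), Dom_digitGCD n → Spec_digitGCD n (digitGCD n)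

-- ===== LEMMAS AND PROOFS =====

-- both Euclid helpers compute Nat.gcd on nonnegative inputs
lemma pyGcd_natCast (b a : Nat) : pyGcd (a : Int) (b : Int) = (Nat.gcd a b : Int) := by
  induction b using Nat.strong_induction_on generalizing a with
  | _ b ih =>
    rcases Nat.eq_zero_or_pos b with hb | hb
    · subst hb; rw [pyGcd]; simp
    · rw [pyGcd]
      have hb' : (b : Int) ≠ 0 := by exact_mod_cast Nat.pos_iff_ne_zero.mp hb
      rw [dif_neg hb']
      rw [show PySem.Int.mod (a : Int) (b : Int) = ((a % b : Nat) : Int) from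
        PySem.Int.mod_natCast a b]
      rw [ih (a % b) (Nat.mod_lt _ hb) b]
      rw [Nat.gcd_comm b (a % b), ← Nat.gcd_rec b a, Nat.gcd_comm b a]

lemma gcdStep_natCast (b a : Nat) : gcdStep (a : Int) (b : Int) = (Nat.gcd a b : Int) := by
  induction b using Nat.strong_induction_on generalizing a with
  | _ b ih =>
    rcases Nat.eq_zero_or_pos b with hb | hb
    · subst hb; rw [gcdStep]; simp
    · rw [gcdStep]
      have hb' : (b : Int) ≠ 0 := by exact_mod_cast Nat.pos_iff_ne_zero.mp hb
      rw [dif_neg hb']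
      rw [show PySem.Int.mod (a : Int) (b : Int) = ((a % b : Nat) : Int) from
        PySem.Int.mod_natCast a b]
      rw [ih (a % b) (Nat.mod_lt _ hb) b]
      rw [Nat.gcd_comm b (a % b), ← Nat.gcd_rec b a, Nat.gcd_comm b a]

-- A's loop folds Nat.gcd over the little-endian digits
lemma digitGCDLoop_natCast (m : Nat) (ans : Nat) :
    digitGCDLoop (m : Int) (ans : Int) =
      (((Nat.digits 10 m).foldl (fun a d => Nat.gcd d a) ans : Nat) : Int) := by
  induction m using Nat.strong_induction_on generalizing ans with
  | _ m ih =>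
    rcases Nat.eq_zero_or_pos m with hm | hm
    · subst hm; rw [digitGCDLoop]; simp
    · rw [digitGCDLoop]
      have hm' : (0 : Int) < (m : Int) := by exact_mod_cast hm
      rw [dif_pos hm']
      rw [show PySem.Int.mod (m : Int) 10 = ((m % 10 : Nat) : Int) from
        PySem.Int.mod_natCast m 10]
      rw [show PySem.Int.floordiv (m : Int) 10 = ((m / 10 : Nat) : Int) from
        PySem.Int.floordiv_natCast m 10]
      rw [pyGcd_natCast, ih (m / 10) (Nat.div_lt_self hm (by norm_num))]
      rw [Nat.digits_def' (by norm_num : 1 < 10) hm]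
      simp [List.foldl_cons]

-- accumulator lemma for Nat.toDigitsCore
lemma toDigitsCore_append (f : Nat) : ∀ (n : Nat) (l : List Char),
    Nat.toDigitsCore 10 f n l = Nat.toDigitsCore 10 f n [] ++ l := by
  induction f with
  | zero => intro n l; simp [Nat.toDigitsCore]
  | succ f ih =>
    intro n l
    simp only [Nat.toDigitsCore]
    by_cases h : n / 10 = 0
    · simp [h]
    · simp only [if_neg h]
      rw [ih (n / 10) ((n % 10).digitChar :: l), ih (n / 10) [(n % 10).digitChar]]
      simp

-- fuel irrelevance: any fuel > n gives the fuel-(n+1) result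
lemma toDigitsCore_fuel (n : Nat) : ∀ (f : Nat) (l : List Char), n < f →
    Nat.toDigitsCore 10 f n l = Nat.toDigitsCore 10 (n + 1) n l := by
  induction n using Nat.strong_induction_on with
  | _ n ih =>
    intro f l hf
    obtain ⟨f', rfl⟩ : ∃ f', f = f' + 1 := ⟨f - 1, by omega⟩
    simp only [Nat.toDigitsCore]
    by_cases h : n / 10 = 0
    · simp [h]
    · simp only [if_neg h]
      have hlt : n / 10 < n := Nat.div_lt_self (by omega) (by norm_num)
      rw [ih (n / 10) hlt f' _ (by omega), ih (n / 10) hlt n _ (by omega)]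

-- str(m) for m > 0 is the big-endian digit characters
lemma toDigits_eq (m : Nat) (hm : 0 < m) :
    Nat.toDigits 10 m = ((Nat.digits 10 m).map Nat.digitChar).reverse := by
  induction m using Nat.strong_induction_on with
  | _ m ih =>
    rw [Nat.digits_def' (by norm_num : 1 < 10) hm]
    simp only [List.map_cons, List.reverse_cons]
    unfold Nat.toDigits
    simp only [Nat.toDigitsCore]
    by_cases h : m / 10 = 0
    · simp [h]
    · simp only [if_neg h]
      rw [toDigitsCore_append, toDigitsCore_fuel (m / 10) m _ (Nat.div_lt_self hm (by norm_num))]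
      rw [show Nat.toDigitsCore 10 (m / 10 + 1) (m / 10) [] = Nat.toDigits 10 (m / 10) from rfl]
      rw [ih (m / 10) (Nat.div_lt_self hm (by norm_num)) (by omega)]

lemma digitChar_toNat (d : Nat) (hd : d < 10) : (Nat.digitChar d).toNat = 48 + d := by
  interval_cases d <;> rfl

-- B's fold over the digit characters is the foldr of Nat.gcd over little-endian digits
lemma foldB_eq (ds : List Nat) (hds : ∀ d ∈ ds, d < 10) (a : Nat) :
    (ds.map Nat.digitChar).reverse.foldl (fun g c => gcdStep g ((c.toNat : Int) - 48)) (a : Int)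
      = ((ds.foldr (fun d g => Nat.gcd g d) a : Nat) : Int) := by
  rw [List.foldl_reverse, List.foldr_map]
  induction ds with
  | nil => rfl
  | cons d t ih =>
    simp only [List.foldr_cons]
    rw [ih (fun x hx => hds x (List.mem_cons_of_mem d hx))]
    rw [digitChar_toNat d (hds d List.mem_cons_self)]
    have : ((48 + d : Nat) : Int) - 48 = (d : Int) := by push_cast; ring
    rw [this, gcdStep_natCast]

-- the two fold orders agree
lemma foldl_eq_foldr_gcd (ds : List Nat) (a : Nat) :
    ds.foldl (fun a d => Nat.gcd d a) a = Nat.gcd (ds.foldr (fun d g => Nat.gcd g d) 0) a := by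
  induction ds generalizing a with
  | nil => simp
  | cons d t ih =>
    simp only [List.foldl_cons, List.foldr_cons]
    rw [ih (Nat.gcd d a), Nat.gcd_assoc]

-- ===== VERDICT (by name: the statement is the Claim_ definition above) =====
theorem digitGCD_spec : Claim_equal_digitGCD := by
  intro n _
  unfold Spec_digitGCD digitGCD digitGCD_alt
  by_cases hn : n ≤ 0
  · rw [if_pos hn, digitGCDLoop, dif_neg (by omega)]
  · rw [if_neg hn]
    obtain ⟨m, rfl⟩ : ∃ m : Nat, n = (m : Int) := ⟨n.toNat, by omega⟩
    have hm : 0 < m := by exact_mod_cast (by omega : (0:Int) < (m:Int))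
    have h0 : ((0 : Nat) : Int) = (0 : Int) := rfl
    rw [← h0, digitGCDLoop_natCast m 0]
    rw [PySem.Int.toList_toStr]
    unfold PySem.Int.toChars
    rw [if_neg (by omega), show (m : Int).toNat = m from by omega]
    rw [toDigits_eq m hm,
      foldB_eq (Nat.digits 10 m) (fun d hd => Nat.digits_lt_base (by norm_num) hd) 0]
    rw [foldl_eq_foldr_gcd]
    simp
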